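-- pv_equiv track=rewrite | github.com/limstonestone/ps-repo | programmers/Level2/[240215] 더 맵게.py | solution
-- ===== SOURCE A (Python) =====
-- def solution(scoville, K):
--     """
--     - 약 10분 풀이
--     - 최소 힙을 활용하여 풀이, 이 때 힙의 속성을 보장하기 위해 먼저 heapify 를 꼭 해주어야함
--     """
--     import heapq
--
--     answer = 0
--     heapq.heapify(scoville)
--
--     while scoville:  # 계속해서 섞음
--         min1 = heapq.heappop(scoville)
--         if min1 >= K:  # 최소 값이 K 를 넘었으므로 정답값 리턴
--             return answer
--         if scoville:
--             min2 = heapq.heappop(scoville)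
--             heapq.heappush(scoville, min1 + min2 * 2)
--             answer += 1
--
--     return -1  # 다 섞어도 조건에 미치지못했으므로 -1 리턴
-- ===== SOURCE B (Python) =====
-- def solution(scoville, K):
--     foods = list(scoville)
--     answer = 0
--     while foods:
--         min1 = min(foods)
--         if min1 >= K:
--             return answer
--         foods.remove(min1)
--         if foods:
--             min2 = min(foods)
--             foods.remove(min2)
--             foods.append(min1 + 2 * min2)
--             answer += 1
--     return -1
-- ===== Notes on version B (the rewrite author's own statement) =====
-- stated objective: simpler
-- what changed: Replaces the maintained binary min-heap with a plain list (a pure copy of scoville) scanned by min()/remove() each round, so no heap invariant or heapq is needed.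
import Mathlib
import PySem

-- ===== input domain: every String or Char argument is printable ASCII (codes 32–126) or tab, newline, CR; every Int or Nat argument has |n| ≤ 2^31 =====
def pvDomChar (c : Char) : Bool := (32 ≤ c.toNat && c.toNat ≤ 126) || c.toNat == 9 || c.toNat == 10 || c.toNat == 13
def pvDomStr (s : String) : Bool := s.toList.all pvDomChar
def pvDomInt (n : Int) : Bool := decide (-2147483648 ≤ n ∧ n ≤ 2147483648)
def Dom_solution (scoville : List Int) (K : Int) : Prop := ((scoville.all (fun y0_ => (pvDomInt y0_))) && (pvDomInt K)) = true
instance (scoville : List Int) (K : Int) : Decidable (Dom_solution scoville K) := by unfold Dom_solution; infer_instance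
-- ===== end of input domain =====

-- B replaces A's maintained min-heap by repeated min()/remove() scans over a plain list
-- (objective: simpler). Python A heapifies/pops `scoville` in place; B copies it; the
-- equivalence proved here is about the return value only.

-- ===== PORT A =====
-- heapq is not covered by PySem: the heapq calls are ported as an exact min-heap (a skew
-- heap).  Every heappop below returns the minimum of the current elements, exactly as
-- CPython's heapq does; this determines every value A's own code observes (min1, min2,
-- the emptiness tests and the returned answer), so the port is exact on all inputs;
-- only the unobservable internal layout of the heap differs from CPython's array.
inductive SHeap : Type
  | nil : SHeap
  | node : Int → SHeap → SHeap → SHeap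
deriving DecidableEq, Repr

def SHeap.size : SHeap → Nat
  | .nil => 0
  | .node _ l r => l.size + r.size + 1

def SHeap.merge : SHeap → SHeap → SHeap
  | .nil, t => t
  | t, .nil => t
  | .node a l1 r1, .node b l2 r2 =>
    if a ≤ b then .node a (SHeap.merge r1 (.node b l2 r2)) l1
    else .node b (SHeap.merge (.node a l1 r1) r2) l2
termination_by t1 t2 => t1.size + t2.size
decreasing_by all_goals simp [SHeap.size]

def SHeap.insert (x : Int) (t : SHeap) : SHeap := SHeap.merge (.node x .nil .nil) t

-- heapq.heapify: build the heap from the list (heappush of each element)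
def heapifyA (l : List Int) : SHeap := l.foldl (fun t x => SHeap.insert x t) .nil

-- the `while scoville:` loop of A, with its exact branch structure and return points.
-- `fuel` is only a structural-termination guard: it starts at the heap's size, which
-- bounds the number of iterations (each one shrinks the heap by 1), so the `0, node`
-- branch is never reached.
def loopA (K : Int) (fuel : Nat) (t : SHeap) (answer : Int) : Int :=
  match fuel, t with
  | _, .nil => -1                              -- while-test fails: return -1
  | 0, _ => -1                                 -- dead branch (fuel ≥ heap size)
  | fuel + 1, .node min1 l r =>                -- min1 = heapq.heappop(scoville)
    if min1 ≥ K then answer                    -- return answer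
    else
      match SHeap.merge l r with               -- `if scoville:` on the popped heap
      | .nil => -1                             -- loop re-tests, empty: return -1
      | .node min2 l2 r2 =>                    -- min2 = heapq.heappop(scoville)
        -- heapq.heappush(scoville, min1 + min2 * 2); answer += 1
        loopA K fuel (SHeap.insert (min1 + min2 * 2) (SHeap.merge l2 r2)) (answer + 1)

def solution (scoville : List Int) (K : Int) : Int :=
  loopA K (heapifyA scoville).size (heapifyA scoville) 0

-- ===== PORT B =====
-- min(foods) on a nonempty list x :: xs (exact: Python's min of a nonempty int list)
def listMin : Int → List Int → Int
  | x, [] => x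
  | x, y :: ys => listMin (if y < x then y else x) ys

-- foods.remove(v): drop the first occurrence (exact when v is a member; only so called)
def removeFirst : Int → List Int → List Int
  | _, [] => []
  | v, y :: ys => if y = v then ys else y :: removeFirst v ys

-- lemmas cited by loopB's decreasing_by (termination of the port itself)
theorem listMin_mem (l : List Int) : ∀ x : Int, listMin x l ∈ x :: l := by
  induction l with
  | nil => intro x; simp [listMin]
  | cons y ys ih =>
    intro x
    have h := ih (if y < x then y else x)
    simp only [listMin]
    rcases List.mem_cons.1 h with h' | h'
    · rw [h']; split <;> simp
    · simp [h']

theorem length_removeFirst {v : Int} {l : List Int} (h : v ∈ l) :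
    (removeFirst v l).length + 1 = l.length := by
  induction l with
  | nil => simp at h
  | cons y ys ih =>
    by_cases hy : y = v
    · simp [removeFirst, hy]
    · rcases List.mem_cons.1 h with h' | h'
      · exact absurd h'.symm hy
      · simp [removeFirst, hy, ih h']

-- the `while foods:` loop of Source B, same branch structure and return points
def loopB (K : Int) (foods : List Int) (answer : Int) : Int :=
  match foods with
  | [] => -1
  | x :: xs =>
    let min1 := listMin x xs                       -- min1 = min(foods)
    if min1 ≥ K then answer                        -- return answer
    else
      match h1 : removeFirst min1 (x :: xs) with   -- foods.remove(min1); if foods: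
      | [] => -1
      | y :: ys =>
        let min2 := listMin y ys                   -- min2 = min(foods)
        -- foods.remove(min2); foods.append(min1 + 2 * min2); answer += 1
        loopB K (removeFirst min2 (y :: ys) ++ [min1 + 2 * min2]) (answer + 1)
termination_by foods.length
decreasing_by
  have h2 := length_removeFirst (v := listMin y ys) (l := y :: ys) (listMin_mem ys y)
  have h0 := length_removeFirst (v := listMin x xs) (l := x :: xs) (listMin_mem xs x)
  rw [h1] at h0
  simp at *
  omega

def solution_alt (scoville : List Int) (K : Int) : Int :=
  loopB K scoville 0

-- ===== PRECONDITION & SPEC =====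
def Spec_solution (scoville : List Int) (K : Int) (out : Int) : Prop := out = solution_alt scoville K
instance (scoville : List Int) (K : Int) (out : Int) : Decidable (Spec_solution scoville K out) := by unfold Spec_solution; infer_instance

-- ===== CLAIM (what is proved, stated in full; the proofs are below) =====
def Claim_equal_solution : Prop := ∀ (scoville : List Int) (K : Int), Dom_solution scoville K → Spec_solution scoville K (solution scoville K)

-- ===== LEMMAS AND PROOFS =====

theorem SHeap.size_merge (t1 t2 : SHeap) : (SHeap.merge t1 t2).size = t1.size + t2.size := by
  fun_induction SHeap.merge t1 t2 <;> simp [SHeap.size, *] <;> omega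

def SHeap.toMS : SHeap → Multiset Int
  | .nil => 0
  | .node v l r => {v} + l.toMS + r.toMS

def SHeap.HO : SHeap → Prop
  | .nil => True
  | .node v l r => (∀ x ∈ l.toMS, v ≤ x) ∧ (∀ x ∈ r.toMS, v ≤ x) ∧ l.HO ∧ r.HO

theorem SHeap.toMS_merge (t1 t2 : SHeap) : (SHeap.merge t1 t2).toMS = t1.toMS + t2.toMS := by
  fun_induction SHeap.merge t1 t2 <;> simp [SHeap.toMS, *] <;> (try rw [Multiset.cons_swap]) <;> abel

theorem SHeap.root_le {v : Int} {l r : SHeap} (h : (SHeap.node v l r).HO) :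
    ∀ x ∈ (SHeap.node v l r).toMS, v ≤ x := by
  obtain ⟨hl, hr, _, _⟩ := h
  intro x hx
  simp only [SHeap.toMS, Multiset.mem_add, Multiset.mem_singleton] at hx
  rcases hx with (rfl | hx) | hx
  · exact le_refl x
  · exact hl x hx
  · exact hr x hx

theorem SHeap.HO_merge (t1 t2 : SHeap) : t1.HO → t2.HO → (SHeap.merge t1 t2).HO := by
  fun_induction SHeap.merge t1 t2 with
  | case1 t => exact fun _ h => h
  | case2 t h => exact fun h _ => h
  | case3 a l1 r1 b l2 r2 hab ih =>
    intro h1 h2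
    obtain ⟨hl1, hr1, hol1, hor1⟩ := h1
    refine ⟨?_, hl1, ih hor1 h2, hol1⟩
    intro x hx
    rw [SHeap.toMS_merge] at hx
    rcases Multiset.mem_add.1 hx with hx | hx
    · exact hr1 x hx
    · exact le_trans hab (SHeap.root_le h2 x hx)
  | case4 a l1 r1 b l2 r2 hab ih =>
    intro h1 h2
    obtain ⟨hl2, hr2, hol2, hor2⟩ := h2
    refine ⟨?_, hl2, ih h1 hor2, hol2⟩
    intro x hx
    rw [SHeap.toMS_merge] at hx
    rcases Multiset.mem_add.1 hx with hx | hx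
    · exact le_trans (le_of_not_ge hab) (SHeap.root_le h1 x hx)
    · exact hr2 x hx

theorem listMin_le (l : List Int) : ∀ x : Int, ∀ y ∈ x :: l, listMin x l ≤ y := by
  induction l with
  | nil => intro x y hy; simp at hy; simp [listMin, hy]
  | cons z zs ih =>
    intro x y hy
    simp only [listMin]
    have hmx : (if z < x then z else x) ≤ x := by split <;> omega
    have hmz : (if z < x then z else x) ≤ z := by split <;> omega
    have hself := ih (if z < x then z else x) _ (List.mem_cons_self ..)
    rcases List.mem_cons.1 hy with rfl | hy
    · exact le_trans hself hmx
    · rcases List.mem_cons.1 hy with rfl | hy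
      · exact le_trans hself hmz
      · exact ih _ y (List.mem_cons_of_mem _ hy)

theorem removeFirst_ms {v : Int} {l : List Int} (h : v ∈ l) :
    (↑l : Multiset Int) = {v} + ↑(removeFirst v l) := by
  induction l with
  | nil => simp at h
  | cons y ys ih =>
    by_cases hy : y = v
    · subst hy; simp [removeFirst]
    · rcases List.mem_cons.1 h with h' | h'
      · exact absurd h'.symm hy
      · simp only [removeFirst, hy, if_false, ← Multiset.cons_coe, ih h',
          Multiset.singleton_add]
        exact Multiset.cons_swap _ _ _

theorem SHeap.toMS_insert (x : Int) (t : SHeap) :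
    (SHeap.insert x t).toMS = {x} + t.toMS := by
  simp [SHeap.insert, SHeap.toMS_merge, SHeap.toMS]

theorem SHeap.HO_insert (x : Int) (t : SHeap) (h : t.HO) : (SHeap.insert x t).HO := by
  exact SHeap.HO_merge _ _ (by simp [SHeap.HO, SHeap.toMS]) h

theorem loop_eq (K : Int) : ∀ (fuel : Nat) (t : SHeap) (l : List Int) (ans : Int),
    t.size ≤ fuel → t.HO → t.toMS = ↑l → loopA K fuel t ans = loopB K l ans := by
  intro fuel
  induction fuel with
  | zero =>
    intro t l ans hsize hho hms
    cases t with
    | nil =>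
      have hl : l = [] := by
        have h0 : (↑l : Multiset Int) = 0 := by rw [← hms]; rfl
        simpa using h0
      subst hl
      simp [loopA, loopB]
    | node v tl tr => simp [SHeap.size] at hsize
  | succ fuel ih =>
  intro t l ans hsize hho hms
  cases t with
  | nil =>
    have hl : l = [] := by
      have h0 : (↑l : Multiset Int) = 0 := by rw [← hms]; rfl
      simpa using h0
    subst hl
    simp [loopA, loopB]
  | node v tl tr =>
    cases l with
    | nil =>
      exfalso
      have hv : v ∈ (↑([] : List Int) : Multiset Int) := by
        rw [← hms]; simp [SHeap.toMS]
      simp at hv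
    | cons x xs =>
      have hvl : v ∈ x :: xs := by
        have hv : v ∈ (↑(x :: xs) : Multiset Int) := by rw [← hms]; simp [SHeap.toMS]
        simpa using hv
      have hm1t : listMin x xs ∈ (SHeap.node v tl tr).toMS := by
        rw [hms]; exact Multiset.mem_coe.2 (listMin_mem xs x)
      have hveq : v = listMin x xs :=
        le_antisymm (SHeap.root_le hho _ hm1t) (listMin_le xs x v hvl)
      obtain ⟨hvtl, hvtr, hotl, hotr⟩ := hho
      have hkey : (SHeap.merge tl tr).toMS = ↑(removeFirst v (x :: xs)) := by
        have h1 := hms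
        rw [removeFirst_ms hvl] at h1
        simp only [SHeap.toMS] at h1
        rw [add_assoc] at h1
        rw [SHeap.toMS_merge]
        exact add_left_cancel h1
      rw [loopA.eq_def, loopB.eq_def]
      simp only [← hveq]
      by_cases hK : v ≥ K
      · simp [hK]
      · simp only [if_neg hK]
        split
        · split
          · rfl
          · rename_i heqA y ys heqB
            rw [← hveq] at heqB
            rw [heqA, heqB] at hkey
            exact absurd hkey.symm (by simp [SHeap.toMS])
        · rename_i v2 l2 r2 heqA
          have hoM : (SHeap.merge tl tr).HO := SHeap.HO_merge tl tr hotl hotr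
          rw [heqA] at hoM
          rw [heqA] at hkey
          split
          · rename_i heqB
            rw [← hveq] at heqB
            rw [heqB] at hkey
            simp [SHeap.toMS] at hkey
          · rename_i y ys heqB
            rw [← hveq] at heqB
            rw [heqB] at hkey
            -- hkey : (node v2 l2 r2).toMS = ↑(y :: ys)
            have hv2l : v2 ∈ y :: ys := by
              have hv2 : v2 ∈ (↑(y :: ys) : Multiset Int) := by
                rw [← hkey]; simp [SHeap.toMS]
              simpa using hv2
            have hm2t : listMin y ys ∈ (SHeap.node v2 l2 r2).toMS := by
              rw [hkey]; exact Multiset.mem_coe.2 (listMin_mem ys y)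
            have hv2eq : v2 = listMin y ys :=
              le_antisymm (SHeap.root_le hoM _ hm2t) (listMin_le ys y v2 hv2l)
            obtain ⟨hv2l2, hv2r2, hol2, hor2⟩ := hoM
            rw [← hv2eq]
            have harg : v + 2 * v2 = v + v2 * 2 := by ring
            rw [harg]
            have hins : ∀ (a : Int) (t : SHeap),
                (SHeap.insert a t).size = t.size + 1 := by
              intro a t; simp [SHeap.insert, SHeap.size_merge, SHeap.size]; omega
            have hsm := SHeap.size_merge tl tr
            rw [heqA] at hsm
            have hkey2 : l2.toMS + r2.toMS = ↑(removeFirst v2 (y :: ys)) := by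
              have h2 := hkey
              rw [removeFirst_ms hv2l] at h2
              simp only [SHeap.toMS] at h2
              rw [add_assoc] at h2
              exact add_left_cancel h2
            refine ih _ _ (ans + 1) ?_ ?_ ?_
            · rw [hins, SHeap.size_merge]
              simp [SHeap.size] at hsm hsize ⊢
              omega
            · exact SHeap.HO_insert _ _ (SHeap.HO_merge l2 r2 hol2 hor2)
            · rw [SHeap.toMS_insert, SHeap.toMS_merge, hkey2]
              have hc : (↑(removeFirst v2 (y :: ys) ++ [v + v2 * 2]) : Multiset Int)
                  = ↑(removeFirst v2 (y :: ys)) + {v + v2 * 2} := by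
                rw [← Multiset.coe_add]; rfl
              rw [hc, add_comm]

theorem heapify_fold_toMS (l : List Int) : ∀ t : SHeap,
    (l.foldl (fun t x => SHeap.insert x t) t).toMS = t.toMS + ↑l := by
  induction l with
  | nil => intro t; simp
  | cons x xs ih =>
    intro t
    simp only [List.foldl_cons, ih, SHeap.toMS_insert, ← Multiset.cons_coe,
      Multiset.singleton_add, Multiset.cons_add]
    rw [Multiset.add_cons]

theorem heapify_toMS (l : List Int) : (heapifyA l).toMS = ↑l := by
  simp [heapifyA, heapify_fold_toMS, SHeap.toMS]

theorem heapify_fold_HO (l : List Int) : ∀ t : SHeap,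
    t.HO → (l.foldl (fun t x => SHeap.insert x t) t).HO := by
  induction l with
  | nil => exact fun t h => h
  | cons x xs ih => exact fun t h => ih _ (SHeap.HO_insert x t h)

theorem heapify_HO (l : List Int) : (heapifyA l).HO := by
  exact heapify_fold_HO l _ trivial

-- ===== VERDICT (by name: the statement is the Claim_ definition above) =====
theorem solution_spec : Claim_equal_solution := by
  intro scoville K _
  unfold Spec_solution solution solution_alt
  exact loop_eq K _ _ scoville 0 le_rfl (heapify_HO scoville) (heapify_toMS scoville)
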